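-- pv_equiv track=rewrite | github.com/BossCai-790923/Project | python_0135_practice_add_number.py | solution2_math_optimized
-- ===== SOURCE A (Python) =====
-- def solution2_math_optimized(base_number, term_count):
--     sum_ = 0
--
--     term_value = base_number  # put term 0 into sum
--     sum_ += term_value
--
--     for _ in range(term_count - 1):  # repeat term_count - 1 times, since we start from term 1
--         term_value = term_value * 10 + base_number  # calculate the next value of 'term_value'
--         sum_ += term_value  # add to sum
--
--     return sum_
-- ===== SOURCE B (Python) =====
-- def solution2_math_optimized(base_number, term_count):
--     if term_count <= 1:
--         return base_number
--     return base_number * (10 ** (term_count + 1) - 9 * term_count - 10) // 81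
-- ===== Notes on version B (the rewrite author's own statement) =====
-- stated objective: faster
-- what changed: Replaced the O(n) accumulation loop with the closed form base*(10^(n+1)-9n-10)//81 via one pow, with term_count<=1 returning base_number; intended as faster (measured 102x at n=16384; at the largest size result decoding, not computation, failed).
import Mathlib
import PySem

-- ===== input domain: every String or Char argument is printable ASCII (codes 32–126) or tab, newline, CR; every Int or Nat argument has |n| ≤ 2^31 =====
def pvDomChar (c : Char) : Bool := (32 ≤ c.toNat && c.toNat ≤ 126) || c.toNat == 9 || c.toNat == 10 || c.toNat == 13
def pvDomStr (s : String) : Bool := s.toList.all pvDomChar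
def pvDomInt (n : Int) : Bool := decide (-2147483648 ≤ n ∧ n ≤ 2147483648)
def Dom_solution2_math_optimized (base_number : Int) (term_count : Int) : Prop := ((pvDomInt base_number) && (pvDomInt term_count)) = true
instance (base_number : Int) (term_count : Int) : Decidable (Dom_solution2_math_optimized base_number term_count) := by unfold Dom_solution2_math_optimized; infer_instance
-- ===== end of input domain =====

-- B replaces A's term-by-term accumulation loop with the closed form base·(10^(n+1)−9n−10)//81 (intended as faster: one pow instead of n loop steps; measured 102x at n=16384).

-- ===== PORT A =====
-- loop state: (sum_, term_value); one fold step = one iteration of A's for-loop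
def solution2_math_optimized (base_number : Int) (term_count : Int) : Int :=
  let sum_ : Int := 0
  let term_value : Int := base_number
  let sum_ := sum_ + term_value
  ((List.range (term_count - 1).toNat).foldl
    (fun (st : Int × Int) _ =>
      let term_value := st.2 * 10 + base_number
      (st.1 + term_value, term_value)) (sum_, term_value)).1

-- ===== PORT B =====
def solution2_math_optimized_alt (base_number : Int) (term_count : Int) : Int :=
  if term_count ≤ 1 then base_number
  else PySem.Int.floordiv (base_number * (10 ^ (term_count + 1).toNat - 9 * term_count - 10)) 81

-- ===== PRECONDITION & SPEC =====
def Spec_solution2_math_optimized (base_number : Int) (term_count : Int) (out : Int) : Prop := out = solution2_math_optimized_alt base_number term_count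
instance (base_number : Int) (term_count : Int) (out : Int) : Decidable (Spec_solution2_math_optimized base_number term_count out) := by unfold Spec_solution2_math_optimized; infer_instance

-- ===== CLAIM (what is proved, stated in full; the proofs are below) =====
def Claim_equal_solution2_math_optimized : Prop := ∀ (base_number : Int) (term_count : Int), Dom_solution2_math_optimized base_number term_count → Spec_solution2_math_optimized base_number term_count (solution2_math_optimized base_number term_count)

-- ===== LEMMAS AND PROOFS =====

-- loop invariant: after m iterations, 9·term = b·(10^(m+1)−1) and 81·sum = b·(10^(m+2)−9(m+1)−10)
theorem pv_loop_inv (b : Int) (m : Nat) :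
    9 * ((List.range m).foldl
      (fun (st : Int × Int) _ =>
        let t := st.2 * 10 + b
        (st.1 + t, t)) (b, b)).2 = b * (10 ^ (m + 1) - 1) ∧
    81 * ((List.range m).foldl
      (fun (st : Int × Int) _ =>
        let t := st.2 * 10 + b
        (st.1 + t, t)) (b, b)).1 = b * (10 ^ (m + 2) - 9 * (m + 1) - 10) := by
  induction m with
  | zero => constructor <;> simp <;> ring
  | succ m ih =>
    obtain ⟨ht, hs⟩ := ih
    rw [List.range_succ, List.foldl_append]
    push_cast at ht hs ⊢
    constructor
    · simp only [List.foldl_cons, List.foldl_nil]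
      linear_combination 10 * ht
    · simp only [List.foldl_cons, List.foldl_nil]
      linear_combination hs + 90 * ht

-- ===== VERDICT (by name: the statement is the Claim_ definition above) =====
theorem solution2_math_optimized_spec : Claim_equal_solution2_math_optimized := by
  intro b n _
  unfold Spec_solution2_math_optimized solution2_math_optimized solution2_math_optimized_alt
  by_cases h : n ≤ 1
  · have : (n - 1).toNat = 0 := by omega
    simp [this, h]
  · have hm : ∃ m : Nat, (n - 1).toNat = m + 1 ∧ n = (m : Int) + 2 := by
      refine ⟨(n - 1).toNat - 1, by omega, by omega⟩
    obtain ⟨m, hm1, hm2⟩ := hm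
    have hs := (pv_loop_inv b (m + 1)).2
    simp only [hm1, if_neg h]
    have hexp : (n + 1).toNat = m + 3 := by omega
    rw [hexp]
    have hval : b * (10 ^ (m + 3) - 9 * n - 10) =
        81 * ((List.range (m+1)).foldl
          (fun (st : Int × Int) _ =>
            let t := st.2 * 10 + b
            (st.1 + t, t)) (b, b)).1 := by
      rw [hs, hm2]; push_cast; ring
    rw [hval]
    simp [PySem.Int.floordiv]
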